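-- pv_equiv track=rewrite | github.com/kristinaglagolevva-alt/new | backend/app/services/documents.py | _preserve_spaces
-- ===== SOURCE A (Python) =====
-- def _preserve_spaces(text: str) -> str:
--     if not text:
--         return text
--     text = text.replace('\t', '    ')
--     if text.startswith(' '):
--         text = '\u00A0' + text[1:]
--     if text.endswith(' '):
--         text = text[:-1] + '\u00A0'
--     while '  ' in text:
--         text = text.replace('  ', ' \u00A0')
--     return text
-- ===== SOURCE B (Python) =====
-- def _preserve_spaces(text: str) -> str:
--     if not text:
--         return text
--     chars = list(text.replace('\t', '    '))
--     if chars[0] == ' ':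
--         chars[0] = '\u00A0'
--     if chars[-1] == ' ':
--         chars[-1] = '\u00A0'
--     out = []
--     prev = False
--     for ch in chars:
--         if ch == ' ' and prev:
--             out.append('\u00A0')
--             prev = False
--         elif ch == ' ':
--             out.append(' ')
--             prev = True
--         else:
--             out.append(ch)
--             prev = False
--     return ''.join(out)
-- ===== Notes on version B (the rewrite author's own statement) =====
-- stated objective: alternative
-- what changed: Replaces the startswith/endswith string rebuilds and the repeated double-space-to-space+nbsp replace passes of the while loop with in-place fixes of the two boundary characters followed by a single left-to-right scan that tracks whether the previously emitted character was a space.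
import Mathlib
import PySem

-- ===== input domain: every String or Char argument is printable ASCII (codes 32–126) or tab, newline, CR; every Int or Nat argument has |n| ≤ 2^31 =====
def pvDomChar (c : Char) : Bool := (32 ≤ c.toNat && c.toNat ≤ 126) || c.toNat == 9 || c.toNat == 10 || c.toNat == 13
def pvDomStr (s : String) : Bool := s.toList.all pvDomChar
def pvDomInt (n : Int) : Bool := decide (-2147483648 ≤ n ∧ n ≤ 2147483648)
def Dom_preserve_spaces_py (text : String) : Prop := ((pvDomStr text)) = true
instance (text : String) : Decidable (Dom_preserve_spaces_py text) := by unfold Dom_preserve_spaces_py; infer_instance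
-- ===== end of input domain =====

-- B replaces A's startswith/endswith string rebuilds and the repeated replace('  ',' \u00A0') while-loop
-- with in-place boundary fixes plus one left-to-right scan tracking a previous-char-was-space flag (alternative decomposition).


-- the non-breaking space character
def pvNB : Char := '\u00A0'

-- Structural characterisation of one pass of text.replace('  ', ' \u00A0'); it and the
-- three lemmas below are needed by port A's while-loop termination proof (decreasing_by).
def pvRep : List Char → List Char
  | [] => []
  | c :: t =>
    if c = ' ' ∧ t.head? = some ' ' then ' ' :: pvNB :: pvRep t.tail else c :: pvRep t
termination_by l => l.length
decreasing_by all_goals (simp [List.length_tail]; try omega)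

theorem pvRep_go (fuel : ℕ) : ∀ (l acc : List Char), l.length ≤ fuel →
    PySem.Chars.replace.go [' ', ' '] [' ', pvNB] fuel l acc = acc.reverse ++ pvRep l := by
  induction fuel with
  | zero =>
    intro l acc h
    have : l = [] := List.length_eq_zero_iff.mp (Nat.le_zero.mp h)
    subst this
    rw [PySem.Chars.replace.go.eq_def]
    simp [pvRep]
  | succ n ih =>
    intro l acc h
    rw [PySem.Chars.replace.go.eq_def]
    match l, h with
    | [], _ => simp [pvRep]
    | c :: t, h =>
      rw [pvRep]
      by_cases hp : [' ', ' '].isPrefixOf (c :: t) = true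
      · obtain ⟨u, hu⟩ := List.isPrefixOf_iff_prefix.mp hp
        obtain ⟨rfl, t, rfl⟩ : c = ' ' ∧ ∃ t', t = ' ' :: t' := by
          cases t with
          | nil => simp at hu
          | cons d t' =>
            obtain ⟨e1, e2, -⟩ : ' ' = c ∧ ' ' = d ∧ u = t' := by simpa using hu
            exact ⟨e1.symm, t', by rw [← e2]⟩
        simp only [hp, if_true, List.length_cons, List.length_nil, List.drop_succ_cons,
          List.drop_zero, List.head?_cons, Option.some.injEq, true_and, if_pos rfl, List.tail_cons]
        rw [ih t _ (by simp at h ⊢; omega)]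
        simp
      · have hc : ¬ (c = ' ' ∧ t.head? = some ' ') := by
          rintro ⟨rfl, hh⟩
          cases t with
          | nil => simp at hh
          | cons d t' =>
            simp at hh
            subst hh
            simp [List.isPrefixOf] at hp
        simp only [hp, if_false, hc]
        rw [ih t (c :: acc) (Nat.le_of_succ_le_succ h)]
        simp

theorem pvReplace_eq_rep (l : List Char) :
    PySem.Chars.replace l [' ', ' '] [' ', pvNB] = pvRep l := by
  unfold PySem.Chars.replace
  simp only [List.isEmpty_cons, Bool.false_eq_true, if_false]
  simpa using pvRep_go l.length l [] le_rfl

theorem pvRep_count_le (l : List Char) : (pvRep l).count ' ' ≤ l.count ' ' := by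
  fun_induction pvRep with
  | case1 => simp
  | case2 c t h ih =>
    obtain ⟨rfl, hh⟩ := h
    cases t with
    | nil => simp at hh
    | cons d t' =>
      simp at hh; subst hh
      simp [List.count_cons, pvNB] at ih ⊢
      omega
  | case3 c t h ih => simp [List.count_cons]; omega

theorem pvRep_count_lt (l : List Char) (h : [' ', ' '] <:+: l) :
    (pvRep l).count ' ' < l.count ' ' := by
  fun_induction pvRep with
  | case1 => simp at h
  | case2 c t hc ih =>
    obtain ⟨rfl, hh⟩ := hc
    cases t with
    | nil => simp at hh
    | cons d t' =>
      simp at hh; subst hh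
      have := pvRep_count_le t'
      simp [List.count_cons, pvNB]
      omega
  | case3 c t hc ih =>
    rcases List.infix_cons_iff.mp h with hp | hi
    · exfalso
      obtain ⟨u, hu⟩ := hp
      apply hc
      cases t with
      | nil => simp at hu
      | cons d t' =>
        obtain ⟨e1, e2, -⟩ : ' ' = c ∧ ' ' = d ∧ u = t' := by simpa using hu
        exact ⟨e1.symm, by simp [← e2]⟩
    · have := ih hi
      simp [List.count_cons]
      omega

theorem pvWhile_dec (s : String) (h : PySem.Str.isIn "  " s = true) :
    (PySem.Str.replace s "  " " \u00A0").toList.count ' ' < s.toList.count ' ' := by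
  rw [PySem.Str.toList_replace,
    show ("  " : String).toList = [' ', ' '] from by decide,
    show (" \u00A0" : String).toList = [' ', pvNB] from by decide,
    pvReplace_eq_rep]
  apply pvRep_count_lt
  rw [PySem.Str.isIn_eq, show ("  " : String).toList = [' ', ' '] from by decide] at h
  exact (PySem.Chars.isIn_iff_infix _ _).mp h

-- ===== PORT A =====
-- while '  ' in text: text = text.replace('  ', ' \u00A0')
def pvWhileLoop (s : String) : String :=
  if PySem.Str.isIn "  " s = true then pvWhileLoop (PySem.Str.replace s "  " " \u00A0") else s
termination_by s.toList.count ' '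
decreasing_by exact pvWhile_dec s (by assumption)

def preserve_spaces_py (text : String) : String :=
  if text = "" then text
  else
    let t1 := PySem.Str.replace text "\t" "    "
    let t2 := if PySem.Str.startswith t1 " " then "\u00A0" ++ PySem.Str.slice t1 (some 1) none else t1
    let t3 := if PySem.Str.endswith t2 " " then PySem.Str.slice t2 none (some (-1)) ++ "\u00A0" else t2
    pvWhileLoop t3

-- ===== PORT B =====
def preserve_spaces_py_alt (text : String) : String :=
  if text = "" then text
  else
    let chars0 := (PySem.Str.replace text "\t" "    ").toList
    let chars1 := if PySem.List.pyGet? chars0 0 == some ' ' then chars0.set 0 pvNB else chars0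
    let chars2 := if PySem.List.pyGet? chars1 (-1) == some ' ' then chars1.set (chars1.length - 1) pvNB else chars1
    String.ofList (chars2.foldl
      (fun (st : List Char × Bool) ch =>
        if ch == ' ' && st.2 then (st.1 ++ [pvNB], false)
        else if ch == ' ' then (st.1 ++ [' '], true)
        else (st.1 ++ [ch], false)) ([], false)).1

-- ===== PRECONDITION & SPEC =====
def Spec_preserve_spaces_py (text : String) (out : String) : Prop := out = preserve_spaces_py_alt text
instance (text : String) (out : String) : Decidable (Spec_preserve_spaces_py text out) := by unfold Spec_preserve_spaces_py; infer_instance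

-- ===== CLAIM (what is proved, stated in full; the proofs are below) =====
def Claim_equal_preserve_spaces_py : Prop := ∀ (text : String), Dom_preserve_spaces_py text → Spec_preserve_spaces_py text (preserve_spaces_py text)

-- ===== LEMMAS AND PROOFS =====

-- pvRep with a pending previous space (state prev = true of B's scan)
def pvRepT : List Char → List Char
  | [] => []
  | c :: t => if c = ' ' then pvNB :: pvRep t else c :: pvRep t

theorem pvRep_head? (l : List Char) : (pvRep l).head? = l.head? := by
  fun_induction pvRep with
  | case1 => rfl
  | case2 c t h ih => obtain ⟨rfl, -⟩ := h; simp
  | case3 c t h ih => simp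

theorem pvRep_no_double (l : List Char) : ¬ ([' ', ' '] <:+: pvRep l) := by
  fun_induction pvRep with
  | case1 => simp
  | case2 c t h ih =>
    intro hin
    rcases List.infix_cons_iff.mp hin with hp | h2
    · obtain ⟨u, hu⟩ := hp
      injection hu with e1 e2
      injection e2 with e3 e4
      exact absurd e3 (by decide)
    · rcases List.infix_cons_iff.mp h2 with hp | h3
      · obtain ⟨u, hu⟩ := hp
        injection hu with e1 e2
        exact absurd e1 (by decide)
      · exact ih h3
  | case3 c t h ih =>
    intro hin
    rcases List.infix_cons_iff.mp hin with hp | h2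
    · obtain ⟨u, hu⟩ := hp
      obtain ⟨e1, e2⟩ : ' ' = c ∧ (pvRep t).head? = some ' ' := by
        cases hr : pvRep t with
        | nil => rw [hr] at hu; simp at hu
        | cons d r =>
          rw [hr] at hu
          obtain ⟨f1, f2, -⟩ : ' ' = c ∧ ' ' = d ∧ u = r := by simpa using hu
          exact ⟨f1, by simp [← f2]⟩
      rw [pvRep_head?] at e2
      exact h ⟨e1.symm, e2⟩
    · exact ih h2

theorem pvRep_fix (l : List Char) (h : ¬ ([' ', ' '] <:+: l)) : pvRep l = l := by
  fun_induction pvRep with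
  | case1 => rfl
  | case2 c t hc ih =>
    exfalso
    obtain ⟨rfl, hh⟩ := hc
    cases t with
    | nil => simp at hh
    | cons d t' =>
      simp at hh; subst hh
      exact h ⟨[], t', rfl⟩
  | case3 c t hc ih =>
    rw [ih (fun hi => h (List.infix_cons hi))]

theorem pvRep_cons (c : Char) (t : List Char) :
    pvRep (c :: t) = if c = ' ' then ' ' :: pvRepT t else c :: pvRep t := by
  rw [pvRep]
  by_cases hc : c = ' '
  · subst hc
    simp only [if_pos rfl, true_and]
    cases t with
    | nil => simp [pvRepT, pvRep]
    | cons d t' =>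
      by_cases hd : d = ' '
      · subst hd; simp [pvRepT]
      · simp [pvRepT, hd, pvRep]
  · simp [hc]

theorem pvScan_eq (l : List Char) : ∀ (out : List Char) (prev : Bool),
    (l.foldl
      (fun (st : List Char × Bool) ch =>
        if ch == ' ' && st.2 then (st.1 ++ [pvNB], false)
        else if ch == ' ' then (st.1 ++ [' '], true)
        else (st.1 ++ [ch], false)) (out, prev)).1
      = out ++ (if prev then pvRepT l else pvRep l) := by
  induction l with
  | nil => intro out prev; simp [pvRep, pvRepT]
  | cons c t ih =>
    intro out prev
    simp only [List.foldl_cons]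
    by_cases hc : c = ' '
    · subst hc
      cases prev with
      | true =>
        simp only [beq_self_eq_true, Bool.and_true, if_true, ih]
        simp [pvRepT]
      | false =>
        simp only [Bool.and_false, Bool.false_eq_true, if_false, beq_self_eq_true, if_true, ih]
        simp [pvRep_cons]
    · have : (c == ' ') = false := by simp [hc]
      simp only [this, Bool.false_and, Bool.false_eq_true, if_false, ih]
      cases prev <;> simp [pvRep_cons, pvRepT, hc]

theorem pvGet0 (l : List Char) : PySem.List.pyGet? l 0 = l.head? := by
  simp only [PySem.List.pyGet?, PySem.List.pyIdx?]
  cases l <;> simp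

theorem pvGetNeg1 (l : List Char) : PySem.List.pyGet? l (-1) = l.getLast? := by
  simp [PySem.List.pyGet?, PySem.List.pyIdx?]
  rcases Nat.eq_zero_or_pos l.length with h | h
  · simp [List.length_eq_zero_iff.mp h]
  · rw [if_pos (Nat.one_le_iff_ne_zero.mpr (Nat.pos_iff_ne_zero.mp h)), Option.bind_some, List.getLast?_eq_getElem?]

theorem pvSetLast (l : List Char) (x : Char) (h : l ≠ []) : l.set (l.length - 1) x = l.dropLast ++ [x] := by
  induction l with
  | nil => simp at h
  | cons c t ih =>
    cases t with
    | nil => simp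
    | cons d u => simpa using ih (by simp)

theorem pvFix0_eq (s : String) :
    (if PySem.Str.startswith s " " then "\u00A0" ++ PySem.Str.slice s (some 1) none else s).toList
      = (if PySem.List.pyGet? s.toList 0 == some ' ' then s.toList.set 0 pvNB else s.toList) := by
  by_cases h : s.toList.head? = some ' '
  · have hA : PySem.Str.startswith s " " = true := by
      rw [PySem.Str.startswith_eq, PySem.Chars.startswith_iff]
      cases hl : s.toList with
      | nil => rw [hl] at h; simp at h
      | cons c t =>
        rw [hl] at h; simp at h; subst h
        exact ⟨t, by simp⟩
    have hB : (PySem.List.pyGet? s.toList 0 == some ' ') = true := by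
      rw [pvGet0, h]; simp
    rw [if_pos hA, if_pos hB, String.toList_append,
      show ("\u00A0" : String).toList = [pvNB] from by decide,
      PySem.Str.toList_slice, PySem.Chars.slice_eq_listSlice,
      PySem.List.slice_from s.toList (by norm_num : (0:ℤ) ≤ 1)]
    cases hl : s.toList with
    | nil => rw [hl] at h; simp at h
    | cons c t => rw [hl] at h; simp at h; subst h; simp
  · have hA : PySem.Str.startswith s " " ≠ true := by
      intro hp
      rw [PySem.Str.startswith_eq, PySem.Chars.startswith_iff] at hp
      rcases hp with ⟨u, hu⟩
      cases hl : s.toList with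
      | nil => rw [hl] at hu; simp at hu
      | cons c t =>
        rw [hl] at hu
        apply h
        rw [hl]
        have : (' ' :: u : List Char) = c :: t := by simpa using hu
        injection this with e1 e2
        simp [← e1]
    have hB : (PySem.List.pyGet? s.toList 0 == some ' ') ≠ true := by
      rw [pvGet0]; simpa using h
    rw [if_neg hA, if_neg hB]

theorem pvFix1_eq (s : String) :
    (if PySem.Str.endswith s " " then PySem.Str.slice s none (some (-1)) ++ "\u00A0" else s).toList
      = (if PySem.List.pyGet? s.toList (-1) == some ' ' then s.toList.set (s.toList.length - 1) pvNB else s.toList) := by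
  by_cases h : s.toList.getLast? = some ' '
  · have hne : s.toList ≠ [] := by intro he; rw [he] at h; simp at h
    have hA : PySem.Str.endswith s " " = true := by
      rw [PySem.Str.endswith_eq, PySem.Chars.endswith_iff]
      obtain ⟨ys, hys⟩ := List.getLast?_eq_some_iff.mp h
      exact ⟨ys, by rw [hys]; simp⟩
    have hB : (PySem.List.pyGet? s.toList (-1) == some ' ') = true := by
      rw [pvGetNeg1, h]; simp
    rw [if_pos hA, if_pos hB, String.toList_append,
      show ("\u00A0" : String).toList = [pvNB] from by decide,
      PySem.Str.slice_to_neg_one, pvSetLast _ _ hne]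
  · have hA : PySem.Str.endswith s " " ≠ true := by
      intro hp
      rw [PySem.Str.endswith_eq, PySem.Chars.endswith_iff] at hp
      rcases hp with ⟨u, hu⟩
      apply h
      rw [← hu]
      simp
    have hB : (PySem.List.pyGet? s.toList (-1) == some ' ') ≠ true := by
      rw [pvGetNeg1]; simpa using h
    rw [if_neg hA, if_neg hB]

theorem pvReplaceStr_eq (s : String) :
    PySem.Str.replace s "  " " \u00A0" = String.ofList (pvRep s.toList) := by
  unfold PySem.Str.replace
  congr 1
  rw [show ("  " : String).toList = [' ', ' '] from by decide,
    show (" \u00A0" : String).toList = [' ', pvNB] from by decide,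
    pvReplace_eq_rep]

theorem pvWhileLoop_eq (s : String) : pvWhileLoop s = String.ofList (pvRep s.toList) := by
  rw [pvWhileLoop]
  by_cases h : PySem.Str.isIn "  " s = true
  · rw [if_pos h, pvReplaceStr_eq, pvWhileLoop, if_neg ?_]
    intro hcon
    rw [PySem.Str.isIn_eq] at hcon
    simp only [String.toList_ofList] at hcon
    exact pvRep_no_double s.toList ((PySem.Chars.isIn_iff_infix _ _).mp hcon)
  · rw [if_neg h]
    have hni : ¬ ([' ', ' '] <:+: s.toList) := by
      intro hi
      apply h
      rw [PySem.Str.isIn_eq, show ("  " : String).toList = [' ', ' '] from by decide]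
      exact (PySem.Chars.isIn_iff_infix _ _).mpr hi
    rw [pvRep_fix _ hni, String.ofList_toList]

-- ===== VERDICT (by name: the statement is the Claim_ definition above) =====
theorem preserve_spaces_py_spec : Claim_equal_preserve_spaces_py := by
  intro text _
  unfold Spec_preserve_spaces_py
  by_cases he : text = ""
  · simp [preserve_spaces_py, preserve_spaces_py_alt, he]
  · simp only [preserve_spaces_py, preserve_spaces_py_alt, he, if_false]
    rw [pvWhileLoop_eq, pvScan_eq]
    simp only [List.nil_append, Bool.false_eq_true, if_false]
    rw [pvFix1_eq, pvFix0_eq]
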